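-- pv_equiv track=rewrite | github.com/AsenAsenov1/SoftUni-Programming-Fundamentals-with-Python-September-2022 | 22_text_processing_lab/05_digits_letters_and_other.py | symbol_filter
-- ===== SOURCE A (Python) =====
-- def symbol_filter(single_str: str):
--     digits = ""
--     letters = ""
--     symbols = ""
--     for char in single_str:
--         if char.isdigit():
--             digits += char
--         elif char.isalpha():
--             letters += char
--         else:
--             symbols += char
--     return "\n".join([digits, letters, symbols])
-- ===== SOURCE B (Python) =====
-- def symbol_filter(single_str: str):
--     digits = "".join(c for c in single_str if c.isdigit())
--     letters = "".join(c for c in single_str if c.isalpha() and not c.isdigit())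
--     symbols = "".join(c for c in single_str if not c.isdigit() and not c.isalpha())
--     return "\n".join([digits, letters, symbols])
-- ===== Notes on version B (the rewrite author's own statement) =====
-- stated objective: idiomatic
-- what changed: Replaces the single stateful classifying loop with three independent filtering generator expressions joined to strings, one per bucket.
import Mathlib
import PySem

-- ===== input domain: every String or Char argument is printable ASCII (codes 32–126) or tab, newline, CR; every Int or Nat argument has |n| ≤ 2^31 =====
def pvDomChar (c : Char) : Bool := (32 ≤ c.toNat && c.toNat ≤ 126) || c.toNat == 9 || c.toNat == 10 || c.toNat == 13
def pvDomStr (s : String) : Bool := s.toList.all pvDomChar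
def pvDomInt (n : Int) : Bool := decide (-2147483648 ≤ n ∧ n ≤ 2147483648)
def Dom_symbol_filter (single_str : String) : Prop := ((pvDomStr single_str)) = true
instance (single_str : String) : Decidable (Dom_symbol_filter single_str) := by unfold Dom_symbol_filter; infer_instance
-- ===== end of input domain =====

-- B: the single stateful classifying loop is replaced by three independent filtering passes (idiomatic decomposition; same O(n) cost).


-- ===== PORT A =====
-- one pass over the characters, three string accumulators (kept as List Char, joined at the end)
def symbol_filter (single_str : String) : String :=
  let st := single_str.toList.foldl
    (fun (acc : List Char × List Char × List Char) char =>
      if PySem.Chars.isdigit char then (acc.1 ++ [char], acc.2.1, acc.2.2)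
      else if PySem.Chars.isalpha char then (acc.1, acc.2.1 ++ [char], acc.2.2)
      else (acc.1, acc.2.1, acc.2.2 ++ [char]))
    ([], [], [])
  PySem.Str.join "\n" [String.ofList st.1, String.ofList st.2.1, String.ofList st.2.2]

-- ===== PORT B =====
-- three independent filters over the characters
def symbol_filter_alt (single_str : String) : String :=
  let cs := single_str.toList
  let digits := String.ofList (cs.filter (fun c => PySem.Chars.isdigit c))
  let letters := String.ofList (cs.filter (fun c => PySem.Chars.isalpha c && !PySem.Chars.isdigit c))
  let symbols := String.ofList (cs.filter (fun c => !PySem.Chars.isdigit c && !PySem.Chars.isalpha c))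
  PySem.Str.join "\n" [digits, letters, symbols]

-- ===== PRECONDITION & SPEC =====
def Spec_symbol_filter (single_str : String) (out : String) : Prop := out = symbol_filter_alt single_str
instance (single_str : String) (out : String) : Decidable (Spec_symbol_filter single_str out) := by unfold Spec_symbol_filter; infer_instance

-- ===== CLAIM (what is proved, stated in full; the proofs are below) =====
def Claim_equal_symbol_filter : Prop := ∀ (single_str : String), Dom_symbol_filter single_str → Spec_symbol_filter single_str (symbol_filter single_str)

-- ===== LEMMAS AND PROOFS =====

-- loop invariant: A's fold with arbitrary accumulators equals the accumulators extended by B's three filters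
theorem symbol_filter_fold_eq (cs : List Char) (d l s : List Char) :
    cs.foldl
      (fun (acc : List Char × List Char × List Char) char =>
        if PySem.Chars.isdigit char then (acc.1 ++ [char], acc.2.1, acc.2.2)
        else if PySem.Chars.isalpha char then (acc.1, acc.2.1 ++ [char], acc.2.2)
        else (acc.1, acc.2.1, acc.2.2 ++ [char]))
      (d, l, s)
    = (d ++ cs.filter (fun c => PySem.Chars.isdigit c),
       l ++ cs.filter (fun c => PySem.Chars.isalpha c && !PySem.Chars.isdigit c),
       s ++ cs.filter (fun c => !PySem.Chars.isdigit c && !PySem.Chars.isalpha c)) := by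
  induction cs generalizing d l s with
  | nil => simp
  | cons c cs ih =>
    by_cases hd : PySem.Chars.isdigit c
    · simp [List.foldl_cons, hd, ih]
    · by_cases ha : PySem.Chars.isalpha c
      · simp [List.foldl_cons, hd, ha, ih]
      · simp [List.foldl_cons, hd, ha, ih]

-- ===== VERDICT (by name: the statement is the Claim_ definition above) =====
theorem symbol_filter_spec : Claim_equal_symbol_filter := by
  intro single_str _
  unfold Spec_symbol_filter symbol_filter symbol_filter_alt
  simp [symbol_filter_fold_eq]
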